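-- pv_equiv track=rewrite | github.com/SJIKontich/iwe | reeks3/vraag02.py | som_positieve_getallen
-- ===== SOURCE A (Python) =====
-- def som_positieve_getallen(getallen):
--     totaal = 0
--     for getal in getallen:
--         if getal > 0:
--             totaal += getal
--         else:
--             totaal = 0
--     return totaal
-- ===== SOURCE B (Python) =====
-- def som_positieve_getallen(getallen):
--     xs = list(getallen)
--     i = len(xs)
--     while i > 0 and xs[i - 1] > 0:
--         i -= 1
--     return sum(xs[i:])
-- ===== Notes on version B (the rewrite author's own statement) =====
-- stated objective: alternative
-- what changed: Instead of folding with a running total that resets on non-positive elements, B scans backward to find the start of the trailing run of positive numbers and sums that suffix.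
import Mathlib
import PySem

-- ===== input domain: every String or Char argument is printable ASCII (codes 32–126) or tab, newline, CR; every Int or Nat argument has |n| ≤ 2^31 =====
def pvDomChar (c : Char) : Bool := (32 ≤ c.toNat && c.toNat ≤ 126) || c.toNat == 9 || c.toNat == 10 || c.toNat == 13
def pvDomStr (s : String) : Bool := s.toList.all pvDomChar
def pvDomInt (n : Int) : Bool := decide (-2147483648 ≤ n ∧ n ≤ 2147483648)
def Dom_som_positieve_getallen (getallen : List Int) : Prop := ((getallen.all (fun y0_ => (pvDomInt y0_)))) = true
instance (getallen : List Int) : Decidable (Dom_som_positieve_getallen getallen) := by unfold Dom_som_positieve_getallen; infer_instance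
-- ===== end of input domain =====

-- B replaces A's resetting running total by a backward scan for the start of the
-- trailing positive run followed by summing that suffix (objective: alternative).


-- ===== PORT A =====
-- totaal = 0; for getal in getallen: totaal = totaal + getal if getal > 0 else 0
def som_positieve_getallen (getallen : List Int) : Int :=
  getallen.foldl (fun totaal getal => if getal > 0 then totaal + getal else 0) 0

-- ===== PORT B =====
-- the while loop 'while i > 0 and xs[i-1] > 0: i -= 1', structural recursion on i
def somAltStart (xs : List Int) : Nat → Nat
  | 0 => 0
  | i + 1 => if xs.getD i 0 > 0 then somAltStart xs i else i + 1

-- sum(xs[i:]) in forward order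
def som_positieve_getallen_alt (getallen : List Int) : Int :=
  (getallen.drop (somAltStart getallen getallen.length)).foldl (· + ·) 0

-- ===== PRECONDITION & SPEC =====
def Spec_som_positieve_getallen (getallen : List Int) (out : Int) : Prop := out = som_positieve_getallen_alt getallen
instance (getallen : List Int) (out : Int) : Decidable (Spec_som_positieve_getallen getallen out) := by unfold Spec_som_positieve_getallen; infer_instance

-- ===== CLAIM (what is proved, stated in full; the proofs are below) =====
def Claim_equal_som_positieve_getallen : Prop := ∀ (getallen : List Int), Dom_som_positieve_getallen getallen → Spec_som_positieve_getallen getallen (som_positieve_getallen getallen)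

-- ===== LEMMAS AND PROOFS =====

theorem somAltStart_le (xs : List Int) (i : Nat) : somAltStart xs i ≤ i := by
  induction i with
  | zero => simp [somAltStart]
  | succ i ih =>
    simp only [somAltStart]
    split
    · omega
    · omega

theorem somAltStart_append (xs : List Int) (x : Int) (i : Nat) (h : i ≤ xs.length) :
    somAltStart (xs ++ [x]) i = somAltStart xs i := by
  induction i with
  | zero => rfl
  | succ i ih =>
    have hx : (xs ++ [x]).getD i 0 = xs.getD i 0 := by
      have : i < xs.length := by omega
      simp [List.getD, List.getElem?_append_left this]
    simp only [somAltStart, hx]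
    split
    · exact ih (by omega)
    · rfl

theorem foldl_add_shift (xs : List Int) (a : Int) :
    xs.foldl (· + ·) a = a + xs.foldl (· + ·) 0 := by
  induction xs generalizing a with
  | nil => simp
  | cons y ys ih =>
    simp only [List.foldl]
    rw [ih (a + y), ih (0 + y)]
    ring

theorem main_eq (xs : List Int) :
    som_positieve_getallen xs = som_positieve_getallen_alt xs := by
  induction xs using List.reverseRecOn with
  | nil => rfl
  | append_singleton xs x ih =>
    unfold som_positieve_getallen som_positieve_getallen_alt at *
    rw [List.foldl_append]
    simp only [List.foldl]
    have hlen : (xs ++ [x]).length = xs.length + 1 := by simp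
    rw [hlen]
    simp only [somAltStart]
    have hx : (xs ++ [x]).getD xs.length 0 = x := by
      simp [List.getD]
    rw [hx]
    split_ifs with hpos
    · rw [somAltStart_append xs x xs.length le_rfl]
      have hle := somAltStart_le xs xs.length
      rw [List.drop_append_of_le_length (by omega)]
      rw [List.foldl_append]
      simp only [List.foldl]
      rw [ih, foldl_add_shift]
    · have hnil : List.drop (xs.length + 1) (xs ++ [x]) = [] :=
        List.drop_eq_nil_of_le hlen.le
      rw [hnil]
      simp [List.foldl]

-- ===== VERDICT (by name: the statement is the Claim_ definition above) =====
theorem som_positieve_getallen_spec : Claim_equal_som_positieve_getallen := by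
  intro xs _
  exact main_eq xs
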